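-- pv_equiv track=rewrite | github.com/idrimadrid/Test_DE | Journal_max_drug.py | count_med_journal
-- ===== SOURCE A (Python) =====
-- def count_med_journal(counts):
--     """ Count drug in each journal"""
--     count_med = {}
--     for x in counts:
--         for j in counts[x]:
--             if j not in list(count_med.keys()):
--                 count_med[j] = 1
--             else:
--                 count_med[j] += 1
--     return count_med
-- ===== SOURCE B (Python) =====
-- def count_med_journal(counts):
--     """ Count drug in each journal"""
--     flat = [j for x in counts for j in counts[x]]
--     order = []
--     for j in flat:
--         if j not in order:
--             order.append(j)
--     return {j: flat.count(j) for j in order}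
-- ===== Notes on version B (the rewrite author's own statement) =====
-- stated objective: alternative
-- what changed: A streams through the dict incrementing a per-journal counter dict as it goes; B works in three staged passes: materialize the flat list of all journal occurrences, compute the first-occurrence order of distinct journals, then build the result by counting each distinct journal in the flat list with list.count.
import Mathlib
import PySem

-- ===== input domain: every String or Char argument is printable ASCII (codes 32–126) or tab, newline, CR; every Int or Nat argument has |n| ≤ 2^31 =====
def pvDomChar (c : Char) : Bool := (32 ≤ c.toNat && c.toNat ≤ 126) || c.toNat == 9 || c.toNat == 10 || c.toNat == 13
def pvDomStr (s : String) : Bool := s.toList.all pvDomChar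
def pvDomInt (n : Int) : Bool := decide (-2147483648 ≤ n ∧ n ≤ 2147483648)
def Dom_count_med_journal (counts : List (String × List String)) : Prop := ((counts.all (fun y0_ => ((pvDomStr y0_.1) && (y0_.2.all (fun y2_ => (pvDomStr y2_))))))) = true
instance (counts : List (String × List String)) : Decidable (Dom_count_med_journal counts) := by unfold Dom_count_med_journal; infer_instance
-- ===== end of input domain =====

-- B replaces A's single streaming counter-increment pass by three staged passes:
-- flatten all journal occurrences, compute the first-occurrence order of distinct
-- journals, then map each distinct journal to list.count over the flat list
-- (alternative decomposition, same results).

-- ===== PORT A =====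
-- The dict argument is received as an association list; PySem.Dict.ofList counts is the
-- dict the Python function sees, 'for x in counts' iterates its keys in order.
def count_med_journal (counts : List (String × List String)) : List (String × Int) :=
  let d := PySem.Dict.ofList counts
  let cm := d.items.foldl (fun cm p =>
      (d.getD p.1 []).foldl (fun cm j =>
        if !((PySem.Dict.keys cm).contains j) then cm.insert j 1
        else cm.modify j 0 (· + 1)) cm)
    PySem.Dict.empty
  cm.items

-- ===== PORT B =====
def count_med_journal_alt (counts : List (String × List String)) : List (String × Int) :=
  let d := PySem.Dict.ofList counts
  let flat := d.items.flatMap (fun p => d.getD p.1 [])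
  let order := flat.foldl (fun order j =>
      if !(order.contains j) then order ++ [j] else order) []
  order.map (fun j => (j, (PySem.List.count flat j : Int)))

-- ===== PRECONDITION & SPEC =====
def Spec_count_med_journal (counts : List (String × List String)) (out : List (String × Int)) : Prop := out = count_med_journal_alt counts
instance (counts : List (String × List String)) (out : List (String × Int)) : Decidable (Spec_count_med_journal counts out) := by unfold Spec_count_med_journal; infer_instance

-- ===== CLAIM (what is proved, stated in full; the proofs are below) =====
def Claim_equal_count_med_journal : Prop := ∀ (counts : List (String × List String)), Dom_count_med_journal counts → Spec_count_med_journal counts (count_med_journal counts)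

-- ===== LEMMAS AND PROOFS =====

-- A's membership test 'j not in list(count_med.keys())' is dict membership.
theorem keysContains_eq_contains (cm : PySem.Dict String Int) (j : String) :
    (PySem.Dict.keys cm).contains j = cm.contains j := by
  obtain ⟨its⟩ := cm
  induction its with
  | nil => rfl
  | cons p rest ih =>
    simp only [PySem.Dict.keys_mk, PySem.Dict.contains_mk, List.map_cons, List.contains_cons,
      List.any_cons] at *
    rw [ih, BEq.comm]

-- A's branch pair is exactly the Counter step.
theorem stepA_eq_modify :
    (fun (cm : PySem.Dict String Int) (j : String) =>
      if !((PySem.Dict.keys cm).contains j) then cm.insert j 1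
      else cm.modify j 0 (· + 1))
    = (fun (cm : PySem.Dict String Int) (j : String) => cm.modify j 0 (· + 1)) := by
  funext cm j
  rw [keysContains_eq_contains]
  by_cases h : cm.contains j = true
  · simp [h]
  · simp only [Bool.not_eq_true] at h
    simp [h, PySem.Dict.modify, PySem.Dict.getD_of_not_contains cm 0 h]

-- folding through each snd of a pair list = folding through the flattened list
theorem foldl_nested_eq_flatMap {α β γ : Type} (g : γ → β → γ) :
    ∀ (L : List (α × List β)) (init : γ),
      L.foldl (fun acc p => p.2.foldl g acc) init = (L.flatMap Prod.snd).foldl g init := by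
  intro L
  induction L with
  | nil => intro init; rfl
  | cons p L ih =>
    intro init
    simp [List.flatMap_cons, List.foldl_append, ih]

-- looking a key of the dict back up returns its paired value
theorem lookup_snd (counts : List (String × List String)) :
    ∀ p ∈ (PySem.Dict.ofList counts).items, (PySem.Dict.ofList counts).getD p.1 [] = p.2 := by
  intro p hp
  exact PySem.Dict.getD_of_mem_items _ hp (PySem.Dict.nodup_keys_ofList counts) []

-- B's first-occurrence loop is set(flat) in first-seen order
theorem stepB_eq_setAdd :
    (fun (order : List String) (j : String) =>
      if !(order.contains j) then order ++ [j] else order)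
    = (fun (s : PySem.Set String) (j : String) => PySem.Set.add s j) := by
  funext s j
  cases h : s.contains j <;> simp_all [PySem.Set.add, List.contains_eq_mem]

-- ===== VERDICT (by name: the statement is the Claim_ definition above) =====
theorem count_med_journal_spec : Claim_equal_count_med_journal := by
  intro counts _
  unfold Spec_count_med_journal count_med_journal count_med_journal_alt
  have hflat : (PySem.Dict.ofList counts).items.flatMap
      (fun p => (PySem.Dict.ofList counts).getD p.1 [])
      = (PySem.Dict.ofList counts).items.flatMap Prod.snd := by
    apply List.flatMap_congr
    intro p hp
    rw [lookup_snd counts p hp]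
  set flat := (PySem.Dict.ofList counts).items.flatMap Prod.snd with hf
  have hA : (PySem.Dict.ofList counts).items.foldl (fun cm p =>
      ((PySem.Dict.ofList counts).getD p.1 []).foldl (fun cm j =>
        if !((PySem.Dict.keys cm).contains j) then cm.insert j 1
        else cm.modify j 0 (· + 1)) cm) PySem.Dict.empty
      = PySem.Dict.counter flat := by
    rw [PySem.List.foldl_congr_mem _ _
      (fun cm p => (p.2).foldl (fun cm j =>
        if !((PySem.Dict.keys cm).contains j) then cm.insert j 1
        else cm.modify j 0 (· + 1)) cm) PySem.Dict.empty
      (fun acc x hx => by rw [lookup_snd counts x hx]),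
      stepA_eq_modify, foldl_nested_eq_flatMap, PySem.Dict.counter_eq_foldl]
  have horder : flat.foldl (fun order j =>
      if !(order.contains j) then order ++ [j] else order) []
      = PySem.Set.ofList flat := by
    rw [stepB_eq_setAdd, PySem.Set.ofList_eq_foldl]
  simp only [hflat, hA, horder, PySem.Dict.items_counter]
  apply List.map_congr_left
  intro j _
  rw [PySem.List.count_eq]
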